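-- pv_equiv track=rewrite | github.com/User6917/Python-Bakery-Management | securitySys.py | custom_decrypt
-- ===== SOURCE A (Python) =====
-- def custom_decrypt(hex_encrypted_password: str, salt: str, secret_key: str) -> str:
--     """
--     Decrypts the encrypted password using the same XOR operation.
--
--     Args:
--     encrypted_password (str): The encrypted password to decrypt.
--     salt (str): The salt used during encryption.
--     secret_key (str): The secret key used during encryption.
--
--     Returns:
--     str: The decrypted password.
--     """
--     hex_decoded_password = []
--     i = 0
--     while i < len(hex_encrypted_password):
--         if hex_encrypted_password[i:i+2] == '\\x':  # Check for the \x pattern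
--             hex_value = hex_encrypted_password[i+2:i+3]  # Get the two hex digits after \x
--             hex_decoded_password.append(chr(int(hex_value, 16)))  # Convert hex to the original character
--             i += 4  # Skip over the \x and the two hex digits
--         else:
--             hex_decoded_password.append(hex_encrypted_password[i])  # Append regular character
--             i += 1
--     encrypted_password = ''.join(hex_decoded_password)
--
--     return ''.join(
--         chr(ord(encrypted_password[i]) ^ ord(secret_key[i % len(secret_key)]) ^ ord(salt[i % len(salt)]))
--         for i in range(len(encrypted_password))
--     )
-- ===== SOURCE B (Python) =====
-- def custom_decrypt(hex_encrypted_password: str, salt: str, secret_key: str) -> str: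
--     """Decrypts by undoing hex escapes, then XOR with repeated key/salt streams."""
--     s = hex_encrypted_password
--     parts = []
--     i = 0
--     while True:
--         j = s.find('\\x', i)
--         if j < 0:
--             parts.append(s[i:])
--             break
--         parts.append(s[i:j])
--         parts.append(chr(int(s[j + 2], 16)))
--         i = j + 4
--     decoded = ''.join(parts)
--     n = len(decoded)
--     ks = (secret_key * (n // len(secret_key) + 1))[:n] if n else ''
--     ss = (salt * (n // len(salt) + 1))[:n] if n else ''
--     return ''.join(chr(ord(a) ^ ord(b) ^ ord(c)) for a, b, c in zip(decoded, ks, ss))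
-- ===== Notes on version B (the rewrite author's own statement) =====
-- stated objective: faster
-- what changed: Replaces A's char-by-char index state machine with a find-and-jump tokenizer over '\x' occurrences, and replaces A's per-character modular key/salt indexing with keystreams built once by string repetition and zipped with the decoded text.
import Mathlib
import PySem

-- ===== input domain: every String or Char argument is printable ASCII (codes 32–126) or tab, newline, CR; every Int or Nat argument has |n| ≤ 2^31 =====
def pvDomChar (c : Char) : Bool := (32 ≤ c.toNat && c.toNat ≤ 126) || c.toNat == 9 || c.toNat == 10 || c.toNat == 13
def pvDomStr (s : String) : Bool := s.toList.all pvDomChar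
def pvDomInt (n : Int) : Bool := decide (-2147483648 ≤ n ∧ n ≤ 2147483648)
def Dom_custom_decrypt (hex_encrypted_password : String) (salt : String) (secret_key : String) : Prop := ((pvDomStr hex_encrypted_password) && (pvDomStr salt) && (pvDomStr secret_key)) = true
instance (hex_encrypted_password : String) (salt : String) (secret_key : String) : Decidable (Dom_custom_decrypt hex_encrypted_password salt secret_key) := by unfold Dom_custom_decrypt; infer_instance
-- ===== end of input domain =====

-- B replaces A's char-by-char index state machine by a find-and-jump tokenizer and A's
-- per-character modular key/salt indexing by keystreams built once by repetition
-- (same O(n), measurably faster by a constant factor); return values agree on all of Pre_.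

-- int(t, 16) for the ≤ 1-character strings t these ports build: value of a single hex digit.
-- The 0 of the other arms stands for Python's ValueError; Pre_ excludes those inputs.
def pvHexd (c : Char) : Bool := ('0' ≤ c && c ≤ '9') || ('a' ≤ c && c ≤ 'f') || ('A' ≤ c && c ≤ 'F')

def pvHexVal (c : Char) : Nat :=
  if '0' ≤ c && c ≤ '9' then c.toNat - 48 else if 'a' ≤ c then c.toNat - 87 else c.toNat - 55

def pvInt16 (cs : List Char) : Nat :=
  match cs with
  | [c] => if pvHexd c then pvHexVal c else 0
  | _ => 0

-- ===== PORT A =====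
-- A's while loop over index i, transcribed as the recursion on the suffix s[i:], made total by a
-- fuel argument (fuel = remaining length; each iteration consumes at least one character):
-- s[i:i+2] == '\x' is take 2, s[i+2:i+3] is (drop 2).take 1, i += 4 is drop 4, i += 1 is the tail.
def pvADecodeGo : Nat → List Char → List Char
  | _, [] => []
  | 0, _ :: _ => []          -- fuel exhausted: unreachable from pvADecode
  | fuel + 1, c :: rest =>
    if (c :: rest).take 2 = ['\\', 'x'] then
      Char.ofNat (pvInt16 (((c :: rest).drop 2).take 1)) :: pvADecodeGo fuel ((c :: rest).drop 4)
    else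
      c :: pvADecodeGo fuel rest

def pvADecode (l : List Char) : List Char := pvADecodeGo l.length l

-- i % 0 raises ZeroDivisionError in Python; Pre_ excludes empty salt/secret_key with nonempty text.
def custom_decrypt (hex_encrypted_password : String) (salt : String) (secret_key : String) : String :=
  let encrypted_password := pvADecode hex_encrypted_password.toList
  String.mk ((List.range encrypted_password.length).map (fun i =>
    Char.ofNat (encrypted_password[i]!.toNat
      ^^^ secret_key.toList[i % secret_key.toList.length]!.toNat
      ^^^ salt.toList[i % salt.toList.length]!.toNat)))

-- ===== PORT B =====
-- B's loop: j = s.find('\x', i); emit s[i:j], decode s[j+2], jump to j + 4 — transcribed on the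
-- suffix s[i:] (s.find(sub, i) being PySem.Chars.find on that suffix), with the same fuel scheme.
-- The .getD '0' stands for the IndexError of s[j+2] on a truncated escape; Pre_ excludes those.
def pvBDecodeGo : Nat → List Char → List Char
  | 0, l => l                -- fuel exhausted: unreachable from pvBDecode
  | fuel + 1, l =>
    let j := PySem.Chars.find l ['\\', 'x']
    if j = -1 then l
    else
      l.take j.toNat ++
        Char.ofNat (pvInt16 [(PySem.List.pyGet? l ((j.toNat : Int) + 2)).getD '0']) ::
          pvBDecodeGo fuel (l.drop (j.toNat + 4))

def pvBDecode (l : List Char) : List Char := pvBDecodeGo l.length l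

-- (secret_key * (n // len(secret_key) + 1))[:n]; n // 0 raises ZeroDivisionError in Python
-- (B only evaluates this with n > 0); Pre_ excludes empty salt/secret_key with nonempty text.
def pvRepStream (key : List Char) (n : Nat) : List Char :=
  ((List.replicate (n / key.length + 1) key).flatten).take n

def custom_decrypt_alt (hex_encrypted_password : String) (salt : String) (secret_key : String) : String :=
  let decoded := pvBDecode hex_encrypted_password.toList
  let n := decoded.length
  let ks := if n = 0 then [] else pvRepStream secret_key.toList n
  let ss := if n = 0 then [] else pvRepStream salt.toList n
  String.mk (((decoded.zip ks).zip ss).map (fun p =>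
    Char.ofNat (p.1.1.toNat ^^^ p.1.2.toNat ^^^ p.2.toNat)))

-- ===== PRECONDITION & SPEC =====
-- Token grammar of the input: a sequence of ordinary characters and '\x'-escapes, each escape
-- carrying a hex digit (third char) and, if present, a filler char (fourth one, contributing
-- nothing).  This is a shape condition on the string, checkable left to right by eye.
def pvOk : List Char → Bool
  | [] => true
  | '\\' :: 'x' :: rest =>
    match rest with
    | [] => false
    | [h] => pvHexd h
    | h :: _ :: t => pvHexd h && pvOk t
  | _ :: rest => pvOk rest

-- Pre_ holds exactly where Python A returns: the scan meets no '\x' without a following hex digit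
-- (else int(…, 16) raises ValueError), and a nonempty text needs nonempty salt and secret_key
-- (else i % 0 raises ZeroDivisionError).
def Pre_custom_decrypt (hex_encrypted_password : String) (salt : String) (secret_key : String) : Prop :=
  pvOk hex_encrypted_password.toList = true ∧
    (hex_encrypted_password.toList ≠ [] → salt.toList ≠ [] ∧ secret_key.toList ≠ [])

instance (hex_encrypted_password : String) (salt : String) (secret_key : String) : Decidable (Pre_custom_decrypt hex_encrypted_password salt secret_key) := by unfold Pre_custom_decrypt; infer_instance

def pvWitness_custom_decrypt : String × String × String := ("\\x41b", "pepper", "key")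

def Spec_custom_decrypt (hex_encrypted_password : String) (salt : String) (secret_key : String) (out : String) : Prop := out = custom_decrypt_alt hex_encrypted_password salt secret_key
instance (hex_encrypted_password : String) (salt : String) (secret_key : String) (out : String) : Decidable (Spec_custom_decrypt hex_encrypted_password salt secret_key out) := by unfold Spec_custom_decrypt; infer_instance

-- ===== CLAIM (what is proved, stated in full; the proofs are below) =====
def Claim_equal_custom_decrypt : Prop := ∀ (hex_encrypted_password : String) (salt : String) (secret_key : String), Dom_custom_decrypt hex_encrypted_password salt secret_key → Pre_custom_decrypt hex_encrypted_password salt secret_key → Spec_custom_decrypt hex_encrypted_password salt secret_key (custom_decrypt hex_encrypted_password salt secret_key)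

-- ===== LEMMAS AND PROOFS =====

theorem pv_take2_iff (l : List Char) : l.take 2 = ['\\', 'x'] ↔ ['\\', 'x'] <+: l := by
  constructor
  · intro h; exact h ▸ List.take_prefix _ _
  · intro h; exact List.prefix_iff_eq_take.mp h ▸ rfl

-- fuel irrelevance: any fuel at least the length computes the same value
theorem pvADecodeGo_fuel : ∀ (f f' : Nat) (l : List Char), l.length ≤ f → l.length ≤ f' →
    pvADecodeGo f l = pvADecodeGo f' l := by
  intro f
  induction f with
  | zero =>
    intro f' l hf _
    have : l = [] := List.eq_nil_of_length_eq_zero (Nat.le_zero.mp hf)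
    subst this
    cases f' <;> rfl
  | succ f ih =>
    intro f' l hf hf'
    cases l with
    | nil => cases f' <;> rfl
    | cons c rest =>
      cases f' with
      | zero => simp at hf'
      | succ f'' =>
        simp only [List.length_cons, Nat.add_le_add_iff_right] at hf hf'
        simp only [pvADecodeGo]
        by_cases h : (c :: rest).take 2 = ['\\', 'x'] <;> simp only [h, if_true, if_false]
        · exact congrArg _ (ih f'' ((c :: rest).drop 4) (by simp; omega) (by simp; omega))
        · exact congrArg _ (ih f'' rest hf hf')

theorem pv_find_nil : PySem.Chars.find [] ['\\', 'x'] = -1 := by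
  rw [PySem.Chars.find_eq_neg_one_iff]
  intro h
  simp at h

theorem pvBDecodeGo_nil (f : Nat) : pvBDecodeGo f [] = [] := by
  cases f with
  | zero => rfl
  | succ f => simp [pvBDecodeGo, pv_find_nil]

theorem pv_find_pos (l : List Char) (h : ¬ PySem.Chars.find l ['\\', 'x'] = -1) :
    (PySem.Chars.find l ['\\', 'x']).toNat + 2 ≤ l.length ∧
      ['\\', 'x'] <+: l.drop (PySem.Chars.find l ['\\', 'x']).toNat ∧
      (∀ i, i < (PySem.Chars.find l ['\\', 'x']).toNat → ¬ (['\\', 'x'] <+: l.drop i)) := by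
  have h0 : (0:Int) ≤ PySem.Chars.find l ['\\', 'x'] := by
    have := PySem.Chars.neg_one_le_find l ['\\', 'x']
    omega
  have hspec := PySem.Chars.find_spec h0
  refine ⟨?_, hspec.1, hspec.2⟩
  have := hspec.1.length_le
  simp at this
  omega

theorem pvBDecodeGo_fuel : ∀ (f f' : Nat) (l : List Char), l.length ≤ f → l.length ≤ f' →
    pvBDecodeGo f l = pvBDecodeGo f' l := by
  intro f
  induction f with
  | zero =>
    intro f' l hf _
    have : l = [] := List.eq_nil_of_length_eq_zero (Nat.le_zero.mp hf)
    subst this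
    rw [pvBDecodeGo_nil, pvBDecodeGo_nil]
  | succ f ih =>
    intro f' l hf hf'
    rcases eq_or_ne l [] with rfl | hl
    · rw [pvBDecodeGo_nil, pvBDecodeGo_nil]
    cases f' with
    | zero =>
      have : l = [] := List.eq_nil_of_length_eq_zero (Nat.le_zero.mp hf')
      exact absurd this hl
    | succ f'' =>
      simp only [pvBDecodeGo]
      by_cases h : PySem.Chars.find l ['\\', 'x'] = -1 <;> simp only [h, if_true, if_false]
      have hpos := (pv_find_pos l h).1
      refine congrArg _ (congrArg _ (ih f'' _ ?_ ?_)) <;> simp <;> omega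

-- clean one-step unfolding equations for the canonical (fuel = length) functions
theorem pvADecode_cons (c : Char) (rest : List Char) :
    pvADecode (c :: rest) =
      if (c :: rest).take 2 = ['\\', 'x'] then
        Char.ofNat (pvInt16 (((c :: rest).drop 2).take 1)) :: pvADecode ((c :: rest).drop 4)
      else
        c :: pvADecode rest := by
  show pvADecodeGo (c :: rest).length (c :: rest) = _
  simp only [List.length_cons, pvADecodeGo]
  by_cases h : (c :: rest).take 2 = ['\\', 'x'] <;> simp only [h, if_true, if_false]
  · exact congrArg _ (pvADecodeGo_fuel _ _ _ (by simp) (by simp))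
  · exact congrArg _ (pvADecodeGo_fuel _ _ _ (by simp) (by simp))

theorem pvOk_cons (c : Char) (rest : List Char) :
    pvOk (c :: rest) =
      if (c :: rest).take 2 = ['\\', 'x'] then
        match (c :: rest).drop 2 with
        | [] => false
        | h :: _ => pvHexd h && pvOk ((c :: rest).drop 4)
      else
        pvOk rest := by
  by_cases htk : (c :: rest).take 2 = ['\\', 'x']
  · rw [if_pos htk]
    cases rest with
    | nil => simp at htk
    | cons r2 rest2 =>
      simp only [List.take_succ_cons, List.take_zero, List.cons.injEq, and_true] at htk
      obtain ⟨rfl, rfl⟩ := htk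
      cases rest2 with
      | nil => rfl
      | cons h t =>
        cases t with
        | nil => simp [pvOk]
        | cons f t2 => rfl
  · rw [if_neg htk]
    cases rest with
    | nil =>
      rw [pvOk.eq_def]
      split
      · rename_i heq; cases heq
      · rename_i heq
        injection heq with _ h2
        injection h2
      · rename_i x xs heq
        injection heq with _ h2
        rw [h2]
    | cons r2 rest2 =>
      rw [pvOk.eq_def]
      split
      · rename_i heq; cases heq
      · rename_i heq
        injection heq with h1 h2
        injection h2 with h2 _
        exact absurd (by rw [h1, h2]; rfl) htk
      · rename_i x xs heq
        injection heq with _ h2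
        rw [h2]

theorem pvBDecode_eq (l : List Char) :
    pvBDecode l =
      if PySem.Chars.find l ['\\', 'x'] = -1 then l
      else
        l.take (PySem.Chars.find l ['\\', 'x']).toNat ++
          Char.ofNat (pvInt16 [(PySem.List.pyGet? l (((PySem.Chars.find l ['\\', 'x']).toNat : Int) + 2)).getD '0']) ::
            pvBDecode (l.drop ((PySem.Chars.find l ['\\', 'x']).toNat + 4)) := by
  rcases eq_or_ne l [] with rfl | hl
  · simp [pvBDecode, pvBDecodeGo, pv_find_nil]
  have hlen : 0 < l.length := List.length_pos_of_ne_nil hl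
  show pvBDecodeGo l.length l = _
  obtain ⟨f, hf⟩ : ∃ f, l.length = f + 1 := ⟨l.length - 1, by omega⟩
  rw [hf]
  simp only [pvBDecodeGo]
  by_cases h : PySem.Chars.find l ['\\', 'x'] = -1 <;> simp only [h, if_true, if_false]
  have hpos := (pv_find_pos l h).1
  refine congrArg _ (congrArg _ (pvBDecodeGo_fuel _ _ _ ?_ ?_)) <;> simp <;> omega

-- A's scan leaves a chunk with no '\x' occurrence unchanged.
theorem pv_adecode_noesc (l : List Char) (hok : pvOk l = true)
    (hno : ¬ (['\\', 'x'] <:+: l)) : pvADecode l = l := by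
  induction l with
  | nil => rfl
  | cons c rest ih =>
    have htk : ¬ ((c :: rest).take 2 = ['\\', 'x']) := fun h =>
      hno ((pv_take2_iff _).mp h).isInfix
    rw [pvADecode_cons, if_neg htk]
    rw [pvOk_cons, if_neg htk] at hok
    rw [ih hok (fun h => hno (List.infix_cons h))]

-- Over the first escape at position j (no occurrence earlier), A's scan emits the j regular
-- chars, then the decoded hex digit, and continues after the skipped filler; pvOk survives.
theorem pv_adecode_step : ∀ (j : Nat) (l : List Char), pvOk l = true →
    ['\\', 'x'] <+: l.drop j → (∀ i, i < j → ¬ (['\\', 'x'] <+: l.drop i)) →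
    ∃ h t, l.drop j = '\\' :: 'x' :: h :: t ∧ pvHexd h = true ∧
      pvADecode l = l.take j ++ Char.ofNat (pvHexVal h) :: pvADecode (l.drop (j + 4)) ∧
      pvOk (l.drop (j + 4)) = true := by
  intro j
  induction j with
  | zero =>
    intro l hok hpre _
    simp only [List.drop_zero] at hpre
    obtain ⟨t0, ht0⟩ := hpre
    subst ht0
    simp only [List.cons_append, List.nil_append] at *
    have htk : ('\\' :: 'x' :: t0).take 2 = ['\\', 'x'] := by simp
    rw [pvOk_cons, if_pos htk] at hok
    cases t0 with
    | nil => simp at hok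
    | cons h t =>
      simp only [List.drop_succ_cons, List.drop_zero, Bool.and_eq_true] at hok
      refine ⟨h, t, rfl, hok.1, ?_, by simpa using hok.2⟩
      rw [pvADecode_cons, if_pos htk]
      simp [pvInt16, hok.1]
  | succ j ih =>
    intro l hok hpre hmin
    cases l with
    | nil => simp at hpre
    | cons c rest =>
      have h0 : ¬ (['\\', 'x'] <+: (c :: rest)) := by
        have := hmin 0 (by omega)
        simpa using this
      have htk : ¬ ((c :: rest).take 2 = ['\\', 'x']) := fun h => h0 ((pv_take2_iff _).mp h)
      rw [pvOk_cons, if_neg htk] at hok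
      have hpre' : ['\\', 'x'] <+: rest.drop j := by simpa using hpre
      have hmin' : ∀ i, i < j → ¬ (['\\', 'x'] <+: rest.drop i) := by
        intro i hi
        have := hmin (i + 1) (by omega)
        simpa using this
      obtain ⟨h, t, hdrop, hhex, hA, hok4⟩ := ih rest hok hpre' hmin'
      refine ⟨h, t, by simpa using hdrop, hhex, ?_, by
        rw [show j + 1 + 4 = (j + 4) + 1 by omega, List.drop_succ_cons]; exact hok4⟩
      rw [pvADecode_cons, if_neg htk, hA]
      rw [show j + 1 + 4 = (j + 4) + 1 by omega, List.drop_succ_cons, List.take_succ_cons,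
        List.cons_append]

-- the decode phases agree on the grammar
theorem pv_dec_eq : ∀ (n : Nat) (l : List Char), l.length ≤ n → pvOk l = true →
    pvADecode l = pvBDecode l := by
  intro n
  induction n with
  | zero =>
    intro l hl _
    have : l = [] := List.eq_nil_of_length_eq_zero (Nat.le_zero.mp hl)
    subst this
    rfl
  | succ n ih =>
    intro l hl hok
    rw [pvBDecode_eq]
    by_cases hfind : PySem.Chars.find l ['\\', 'x'] = -1
    · rw [if_pos hfind]
      exact pv_adecode_noesc l hok ((PySem.Chars.find_eq_neg_one_iff l _).mp hfind)
    · rw [if_neg hfind]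
      obtain ⟨hle, hpre, hmin⟩ := pv_find_pos l hfind
      obtain ⟨h, t, hdrop, hhex, hA, hok4⟩ :=
        pv_adecode_step (PySem.Chars.find l ['\\', 'x']).toNat l hok hpre hmin
      rw [hA]
      have hget : PySem.List.pyGet? l (((PySem.Chars.find l ['\\', 'x']).toNat : Int) + 2) = some h := by
        rw [show (((PySem.Chars.find l ['\\', 'x']).toNat : Int) + 2)
              = (((PySem.Chars.find l ['\\', 'x']).toNat + 2 : Nat) : Int) by push_cast; ring,
          PySem.List.pyGet?_natCast, ← List.getElem?_drop, hdrop]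
        rfl
      rw [hget]
      have hchar : Char.ofNat (pvHexVal h)
          = Char.ofNat (pvInt16 [(some h).getD '0']) := by
        simp [pvInt16, hhex]
      rw [hchar]
      congr 2
      exact ih (l.drop ((PySem.Chars.find l ['\\', 'x']).toNat + 4)) (by simp; omega) hok4

-- keystream by repetition: length and elements
theorem pv_lt_div_succ_mul (n b : Nat) (hb : 0 < b) : n < (n / b + 1) * b :=
  calc n = b * (n / b) + n % b := (Nat.div_add_mod n b).symm
    _ < b * (n / b) + b := by have := Nat.mod_lt n hb; omega
    _ = (n / b + 1) * b := by ring

theorem pv_repStream_length (key : List Char) (n : Nat) (hk : key ≠ []) :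
    (pvRepStream key n).length = n := by
  have hb : 0 < key.length := List.length_pos_of_ne_nil hk
  have := pv_lt_div_succ_mul n key.length hb
  simp only [pvRepStream, List.length_take, List.length_flatten, List.map_replicate,
    List.sum_replicate, smul_eq_mul]
  omega

theorem pv_flatrep_getElem? (key : List Char) : ∀ (m i : Nat), i < m * key.length →
    ((List.replicate m key).flatten)[i]? = key[i % key.length]? := by
  intro m
  induction m with
  | zero => intro i hi; simp at hi
  | succ m ih =>
    intro i hi
    rw [Nat.succ_mul] at hi
    simp only [List.replicate_succ, List.flatten_cons]
    by_cases h : i < key.length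
    · rw [List.getElem?_append_left h, Nat.mod_eq_of_lt h]
    · rw [Nat.not_lt] at h
      rw [List.getElem?_append_right h, ih (i - key.length) (by omega),
        ← Nat.mod_eq_sub_mod h]

theorem pv_repStream_getElem? (key : List Char) (n i : Nat) (hk : key ≠ []) (hi : i < n) :
    (pvRepStream key n)[i]? = key[i % key.length]? := by
  have hb : 0 < key.length := List.length_pos_of_ne_nil hk
  rw [pvRepStream, List.getElem?_take_of_lt hi]
  exact pv_flatrep_getElem? key _ i (lt_of_lt_of_le hi
    (le_of_lt (pv_lt_div_succ_mul n key.length hb)))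

-- the XOR phases agree when both keys are nonempty
theorem pv_xor_eq (e key salt : List Char) (hk : key ≠ []) (hs : salt ≠ []) :
    (List.range e.length).map (fun i =>
        Char.ofNat (e[i]!.toNat ^^^ key[i % key.length]!.toNat ^^^ salt[i % salt.length]!.toNat))
      = ((e.zip (pvRepStream key e.length)).zip (pvRepStream salt e.length)).map (fun p =>
          Char.ofNat (p.1.1.toNat ^^^ p.1.2.toNat ^^^ p.2.toNat)) := by
  have hkl : 0 < key.length := List.length_pos_of_ne_nil hk
  have hsl : 0 < salt.length := List.length_pos_of_ne_nil hs
  have hks : (pvRepStream key e.length).length = e.length := pv_repStream_length key _ hk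
  have hss : (pvRepStream salt e.length).length = e.length := pv_repStream_length salt _ hs
  have hlen : ((e.zip (pvRepStream key e.length)).zip (pvRepStream salt e.length)).length
      = e.length := by
    simp [List.length_zip, hks, hss]
  apply List.ext_getElem (by simp [hlen])
  intro i h1 h2
  simp only [List.getElem_map, List.getElem_range, List.getElem_zip]
  have hi : i < e.length := by simpa using h1
  have hgk : (pvRepStream key e.length)[i]'(by omega) = key[i % key.length]'(Nat.mod_lt i hkl) := by
    have := pv_repStream_getElem? key e.length i hk hi
    rwa [List.getElem?_eq_getElem (by omega), List.getElem?_eq_getElem (Nat.mod_lt i hkl),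
      Option.some.injEq] at this
  have hgs : (pvRepStream salt e.length)[i]'(by omega) = salt[i % salt.length]'(Nat.mod_lt i hsl) := by
    have := pv_repStream_getElem? salt e.length i hs hi
    rwa [List.getElem?_eq_getElem (by omega), List.getElem?_eq_getElem (Nat.mod_lt i hsl),
      Option.some.injEq] at this
  rw [getElem!_pos e i hi, getElem!_pos key (i % key.length) (Nat.mod_lt i hkl),
    getElem!_pos salt (i % salt.length) (Nat.mod_lt i hsl)]
  rw [hgk, hgs]

-- ===== VERDICT (by name: the statement is the Claim_ definition above) =====
theorem custom_decrypt_spec : Claim_equal_custom_decrypt := by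
  intro hp salt key _ hpre
  obtain ⟨hok, hne⟩ := hpre
  unfold Spec_custom_decrypt custom_decrypt custom_decrypt_alt
  have hd : pvADecode hp.toList = pvBDecode hp.toList :=
    pv_dec_eq hp.toList.length hp.toList le_rfl hok
  by_cases h0 : pvBDecode hp.toList = []
  · rw [hd, h0]
    simp
  · have hp0 : hp.toList ≠ [] := by
      intro hnil
      exact h0 (by rw [hnil]; rfl)
    obtain ⟨hsne, hkne⟩ := hne hp0
    have hn0 : ¬ ((pvBDecode hp.toList).length = 0) :=
      fun h => h0 (List.eq_nil_of_length_eq_zero h)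
    rw [hd]
    simp only [if_neg hn0]
    exact congrArg String.mk (pv_xor_eq (pvBDecode hp.toList) key.toList salt.toList hkne hsne)
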